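-- pv_equiv track=rewrite | github.com/oaustegard/transformer-vm | transformer_vm/wasm/reference.py | _sub_borrows
-- ===== SOURCE A (Python) =====
-- def _sub_borrows(a, b):
--     borrows = []
--     borrow = 0
--     for i in range(4):
--         s = ((a >> (8 * i)) & 0xFF) - ((b >> (8 * i)) & 0xFF) - borrow
--         borrow = 1 if s < 0 else 0
--         borrows.append(borrow)
--     return borrows
-- ===== SOURCE B (Python) =====
-- def _sub_borrows(a, b):
--     return [
--         1 if (a & ((1 << (8 * (i + 1))) - 1)) < (b & ((1 << (8 * (i + 1))) - 1)) else 0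
--         for i in range(4)
--     ]
-- ===== Notes on version B (the rewrite author's own statement) =====
-- stated objective: alternative
-- what changed: Replaces the sequential borrow-accumulator loop with a single comprehension that computes each borrow flag independently as a prefix comparison (a & mask) < (b & mask) with mask = 2^(8*(i+1)) - 1, so no state is threaded between iterations.
import Mathlib
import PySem

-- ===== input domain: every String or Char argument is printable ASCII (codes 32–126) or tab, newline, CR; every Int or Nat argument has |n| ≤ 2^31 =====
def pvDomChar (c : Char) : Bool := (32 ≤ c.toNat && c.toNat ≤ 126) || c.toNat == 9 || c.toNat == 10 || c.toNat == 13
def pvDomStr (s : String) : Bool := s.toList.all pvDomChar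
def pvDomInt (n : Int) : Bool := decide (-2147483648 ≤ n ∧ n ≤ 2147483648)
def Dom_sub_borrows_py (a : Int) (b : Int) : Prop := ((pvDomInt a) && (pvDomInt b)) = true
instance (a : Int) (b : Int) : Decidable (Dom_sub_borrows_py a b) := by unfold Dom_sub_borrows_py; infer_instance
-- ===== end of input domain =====

-- B replaces A's carried-borrow loop with independent prefix comparisons (a & mask) < (b & mask); alternative decomposition, same cost.


-- ===== PORT A =====
-- literal port of A: fold over range(4) carrying (borrows, borrow);
-- Python's `x >> k` / `x & m` are Lean's `>>>` / PySem.Int.band; `i.toNat` is exact since range(4) yields i ≥ 0.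
def sub_borrows_py (a : Int) (b : Int) : List Int :=
  let st := (PySem.List.pyRange 0 4 1).foldl
    (fun (st : List Int × Int) (i : Int) =>
      let s := PySem.Int.band (a >>> (8 * i).toNat) 0xFF
               - PySem.Int.band (b >>> (8 * i).toNat) 0xFF - st.2
      let borrow : Int := if s < 0 then 1 else 0
      (st.1 ++ [borrow], borrow))
    ([], 0)
  st.1

-- ===== PORT B =====
-- literal port of B: comprehension over range(4); borrow_i = (a & mask) < (b & mask), mask = (1 << 8*(i+1)) - 1
def sub_borrows_py_alt (a : Int) (b : Int) : List Int :=
  (PySem.List.pyRange 0 4 1).map (fun i =>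
    let mask : Int := ((1 : Int) <<< (8 * (i + 1)).toNat) - 1
    if PySem.Int.band a mask < PySem.Int.band b mask then (1 : Int) else 0)

-- ===== PRECONDITION & SPEC =====
def Spec_sub_borrows_py (a : Int) (b : Int) (out : List Int) : Prop := out = sub_borrows_py_alt a b
instance (a : Int) (b : Int) (out : List Int) : Decidable (Spec_sub_borrows_py a b out) := by unfold Spec_sub_borrows_py; infer_instance

-- ===== CLAIM (what is proved, stated in full; the proofs are below) =====
def Claim_equal_sub_borrows_py : Prop := ∀ (a : Int) (b : Int), Dom_sub_borrows_py a b → Spec_sub_borrows_py a b (sub_borrows_py a b)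

-- ===== LEMMAS AND PROOFS =====

lemma band255 (x : Int) : PySem.Int.band x 255 = x % 256 := by
  unfold PySem.Int.band
  have h1 := Nat.and_two_pow_sub_one_eq_mod x.toNat 8
  norm_num at h1
  split_ifs with hx hm hm
  · show ((x.toNat &&& 255 : Nat) : Int) = x % 256
    rw [h1]; omega
  · exact absurd (by norm_num : (0:Int) ≤ 255) hm
  · show ((255 - (255 &&& (-x - 1).toNat) : Nat) : Int) = x % 256
    generalize hg : (-x - 1).toNat = y
    have h2 := Nat.and_two_pow_sub_one_eq_mod y 8
    norm_num at h2
    rw [Nat.land_comm, h2]; omega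
  · exact absurd (by norm_num : (0:Int) ≤ 255) hm

lemma band65535 (x : Int) : PySem.Int.band x 65535 = x % 65536 := by
  unfold PySem.Int.band
  have h1 := Nat.and_two_pow_sub_one_eq_mod x.toNat 16
  norm_num at h1
  split_ifs with hx hm hm
  · show ((x.toNat &&& 65535 : Nat) : Int) = x % 65536
    rw [h1]; omega
  · exact absurd (by norm_num : (0:Int) ≤ 65535) hm
  · show ((65535 - (65535 &&& (-x - 1).toNat) : Nat) : Int) = x % 65536
    generalize hg : (-x - 1).toNat = y
    have h2 := Nat.and_two_pow_sub_one_eq_mod y 16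
    norm_num at h2
    rw [Nat.land_comm, h2]; omega
  · exact absurd (by norm_num : (0:Int) ≤ 65535) hm

lemma band16777215 (x : Int) : PySem.Int.band x 16777215 = x % 16777216 := by
  unfold PySem.Int.band
  have h1 := Nat.and_two_pow_sub_one_eq_mod x.toNat 24
  norm_num at h1
  split_ifs with hx hm hm
  · show ((x.toNat &&& 16777215 : Nat) : Int) = x % 16777216
    rw [h1]; omega
  · exact absurd (by norm_num : (0:Int) ≤ 16777215) hm
  · show ((16777215 - (16777215 &&& (-x - 1).toNat) : Nat) : Int) = x % 16777216
    generalize hg : (-x - 1).toNat = y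
    have h2 := Nat.and_two_pow_sub_one_eq_mod y 24
    norm_num at h2
    rw [Nat.land_comm, h2]; omega
  · exact absurd (by norm_num : (0:Int) ≤ 16777215) hm

lemma band4294967295 (x : Int) : PySem.Int.band x 4294967295 = x % 4294967296 := by
  unfold PySem.Int.band
  have h1 := Nat.and_two_pow_sub_one_eq_mod x.toNat 32
  norm_num at h1
  split_ifs with hx hm hm
  · show ((x.toNat &&& 4294967295 : Nat) : Int) = x % 4294967296
    rw [h1]; omega
  · exact absurd (by norm_num : (0:Int) ≤ 4294967295) hm
  · show ((4294967295 - (4294967295 &&& (-x - 1).toNat) : Nat) : Int) = x % 4294967296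
    generalize hg : (-x - 1).toNat = y
    have h2 := Nat.and_two_pow_sub_one_eq_mod y 32
    norm_num at h2
    rw [Nat.land_comm, h2]; omega
  · exact absurd (by norm_num : (0:Int) ≤ 4294967295) hm

lemma shift8 (x : Int) : x >>> (8:Nat) = x / 256 := by
  have := Int.shiftRight_eq_div_pow x 8; norm_num at this; exact this
lemma shift16 (x : Int) : x >>> (16:Nat) = x / 65536 := by
  have := Int.shiftRight_eq_div_pow x 16; norm_num at this; exact this
lemma shift24 (x : Int) : x >>> (24:Nat) = x / 16777216 := by
  have := Int.shiftRight_eq_div_pow x 24; norm_num at this; exact this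

-- ===== VERDICT (by name: the statement is the Claim_ definition above) =====
set_option maxHeartbeats 2000000 in
theorem sub_borrows_py_spec : Claim_equal_sub_borrows_py := by
  intro a b _
  show sub_borrows_py a b = sub_borrows_py_alt a b
  have hr : PySem.List.pyRange 0 4 1 = [0, 1, 2, 3] := by decide
  simp only [sub_borrows_py, sub_borrows_py_alt, hr, List.foldl, List.map]
  norm_num [show ((8:Int).toNat) = 8 from rfl, show ((16:Int).toNat) = 16 from rfl,
    show ((24:Int).toNat) = 24 from rfl, show ((32:Int).toNat) = 32 from rfl,
    show ((1:Int) <<< (8:Int)) - 1 = 255 from by decide,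
    show ((1:Int) <<< (16:Int)) - 1 = 65535 from by decide,
    show ((1:Int) <<< (24:Int)) - 1 = 16777215 from by decide,
    show ((1:Int) <<< (32:Int)) - 1 = 4294967295 from by decide,
    shift8, shift16, shift24, band255, band65535, band16777215, band4294967295]
  have r2 : (if a / 256 % 256 - b / 256 % 256 < (if a % 256 < b % 256 then (1:Int) else 0) then (1:Int) else 0)
      = (if a % 65536 < b % 65536 then (1:Int) else 0) := by split_ifs <;> omega
  rw [r2]
  have r3 : (if a / 65536 % 256 - b / 65536 % 256 < (if a % 65536 < b % 65536 then (1:Int) else 0) then (1:Int) else 0)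
      = (if a % 16777216 < b % 16777216 then (1:Int) else 0) := by split_ifs <;> omega
  rw [r3]
  have r4 : (if a / 16777216 % 256 - b / 16777216 % 256 < (if a % 16777216 < b % 16777216 then (1:Int) else 0) then (1:Int) else 0)
      = (if a % 4294967296 < b % 4294967296 then (1:Int) else 0) := by split_ifs <;> omega
  rw [r4]
  exact ⟨rfl, rfl, rfl⟩
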